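-- pv_equiv track=rewrite | github.com/kamja44/Code-Test | CodeTestPython/3st_week/03_09_get_price_not_fall_periods.py | get_price_not_fall_periods
-- ===== SOURCE A (Python) =====
-- def get_price_not_fall_periods(prices):
--     length = len(prices)
--     result = [0] * length
--
--     for i in range(length):
--         price_not_fall_period = 0
--         for j in range(i + 1, length, 1):
--             price_not_fall_period += 1
--             if prices[i] > prices[j]:
--                 break
--         result[i] = price_not_fall_period
--
--     return result
-- ===== SOURCE B (Python) =====
-- def get_price_not_fall_periods(prices):
--     n = len(prices)
--     result = [0] * n
--     stack = []  # indices j > i with strictly decreasing prices downward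
--     for i in range(n - 1, -1, -1):
--         while stack and prices[stack[-1]] >= prices[i]:
--             stack.pop()
--         result[i] = (stack[-1] - i) if stack else (n - 1 - i)
--         stack.append(i)
--     return result
-- ===== Notes on version B (the rewrite author's own statement) =====
-- stated objective: faster
-- what changed: Replaced A's per-day forward scan (restarting from i+1 for every i) with a single right-to-left pass maintaining a monotonic stack of candidate next-strictly-lower-price indices; each result is read off the stack top after popping.
import Mathlib
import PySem

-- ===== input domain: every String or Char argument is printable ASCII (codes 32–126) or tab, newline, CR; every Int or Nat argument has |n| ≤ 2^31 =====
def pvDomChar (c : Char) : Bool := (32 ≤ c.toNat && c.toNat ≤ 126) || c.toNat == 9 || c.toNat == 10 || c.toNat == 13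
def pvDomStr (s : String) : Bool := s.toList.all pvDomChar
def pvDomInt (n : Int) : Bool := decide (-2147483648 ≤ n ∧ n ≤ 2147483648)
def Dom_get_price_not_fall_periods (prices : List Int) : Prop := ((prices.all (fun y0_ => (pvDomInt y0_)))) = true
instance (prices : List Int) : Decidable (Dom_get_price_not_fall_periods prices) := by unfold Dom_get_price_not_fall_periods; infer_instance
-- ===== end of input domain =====

-- B replaces A's quadratic per-day forward scan by a single right-to-left pass with a
-- monotonic stack of candidate "next strictly lower price" indices (O(n) vs O(n^2)).

-- ===== PORT A =====
-- inner loop: `for j in range(i+1, length): count += 1; if prices[i] > prices[j]: break`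
def pvInnerA (p : List Int) (q : Int) : List Nat → Int → Int
  | [], acc => acc
  | j :: rest, acc =>
    if q > p.getD j 0 then acc + 1 else pvInnerA p q rest (acc + 1)

def get_price_not_fall_periods (prices : List Int) : List Int :=
  (List.range prices.length).map (fun i =>
    pvInnerA prices (prices.getD i 0) (List.range' (i + 1) (prices.length - (i + 1))) 0)

-- ===== PORT B =====
-- `while stack and prices[stack[-1]] >= prices[i]: stack.pop()`
def pvPop (p : List Int) (i : Nat) : List Nat → List Nat
  | [] => []
  | t :: rest => if p.getD i 0 ≤ p.getD t 0 then pvPop p i rest else t :: rest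

-- state after processing the last `m` indices (i = n-m .. n-1), right to left:
-- (stack, result entries for those indices)
def pvSufB (p : List Int) (n : Nat) : Nat → List Nat × List Int
  | 0 => ([], [])
  | m + 1 =>
    let prev := pvSufB p n m
    let i := n - (m + 1)
    let s := pvPop p i prev.1
    let r : Int := match s with
      | [] => (n : Int) - 1 - (i : Int)
      | t :: _ => (t : Int) - (i : Int)
    (i :: s, r :: prev.2)

def get_price_not_fall_periods_alt (prices : List Int) : List Int :=
  (pvSufB prices prices.length prices.length).2

-- ===== PRECONDITION & SPEC =====
def Spec_get_price_not_fall_periods (prices : List Int) (out : List Int) : Prop := out = get_price_not_fall_periods_alt prices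
instance (prices : List Int) (out : List Int) : Decidable (Spec_get_price_not_fall_periods prices out) := by unfold Spec_get_price_not_fall_periods; infer_instance

-- ===== CLAIM (what is proved, stated in full; the proofs are below) =====
def Claim_equal_get_price_not_fall_periods : Prop := ∀ (prices : List Int), Dom_get_price_not_fall_periods prices → Spec_get_price_not_fall_periods prices (get_price_not_fall_periods prices)

-- ===== LEMMAS AND PROOFS =====

-- j is a stack survivor for start index i: its price is strictly below every price in [i, j)
def pvGood (p : List Int) (i j : Nat) : Bool :=
  (List.range' i (j - i)).all (fun k => decide (p.getD j 0 < p.getD k 0))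

lemma pvPop_eq_dropWhile (p : List Int) (i : Nat) (l : List Nat) :
    pvPop p i l = l.dropWhile (fun t => decide (p.getD i 0 ≤ p.getD t 0)) := by
  induction l with
  | nil => rfl
  | cons t rest ih =>
    by_cases h : p.getD i 0 ≤ p.getD t 0 <;> simp [pvPop, List.dropWhile_cons, ih]

lemma dropWhile_not_eq_filter {α : Type} (c : α → Bool) (l : List α)
    (h : l.Pairwise (fun a b => c a = true → c b = true)) :
    l.dropWhile (fun x => !(c x)) = l.filter c := by
  induction l with
  | nil => rfl
  | cons a t ih =>
    rcases List.pairwise_cons.mp h with ⟨ha, ht⟩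
    by_cases hc : c a = true
    · simp [List.dropWhile, hc, (List.filter_eq_self).mpr (fun b hb => ha b hb hc)]
    · simp [List.dropWhile, hc, ih ht]

lemma pvGood_self (p : List Int) (i : Nat) : pvGood p i i = true := by
  simp [pvGood]

lemma pvGood_split (p : List Int) (i j : Nat) (hij : i < j) :
    pvGood p i j = (decide (p.getD j 0 < p.getD i 0) && pvGood p (i + 1) j) := by
  have h1 : j - i = (j - (i + 1)) + 1 := by omega
  simp [pvGood, h1, List.range'_succ]

-- prices strictly decrease along the (index-increasing) filtered stack
lemma filtered_pairwise (p : List Int) (i s m : Nat) (his : i ≤ s) :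
    ((List.range' s m).filter (pvGood p i)).Pairwise
      (fun a b => p.getD b 0 < p.getD a 0) := by
  have hp : ((List.range' s m).filter (pvGood p i)).Pairwise (fun a b => a < b) :=
    (List.pairwise_lt_range' (s := s) (n := m) 1).filter _
  refine hp.imp_of_mem ?_
  intro a b ha hb hab
  rcases List.mem_filter.mp ha with ⟨ha1, ha2⟩
  rcases List.mem_filter.mp hb with ⟨hb1, hb2⟩
  have ha1' := List.mem_range'_1.mp ha1
  have hbg : ∀ k ∈ List.range' i (b - i), p.getD b 0 < p.getD k 0 := by
    intro k hk
    have := (List.all_eq_true.mp hb2) k hk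
    simpa using this
  have : a ∈ List.range' i (b - i) := List.mem_range'_1.mpr (by omega)
  exact hbg a this

-- the popped stack is exactly the survivors for start index i
lemma pop_filter (p : List Int) (i m : Nat) :
    pvPop p i ((List.range' (i + 1) m).filter (pvGood p (i + 1)))
      = (List.range' (i + 1) m).filter (pvGood p i) := by
  set c : Nat → Bool := fun t => decide (p.getD t 0 < p.getD i 0) with hc
  have hfun : (fun t => decide (p.getD i 0 ≤ p.getD t 0)) = (fun x => !(c x)) := by
    funext t
    rw [← decide_not]
    exact decide_eq_decide.mpr not_lt.symm
  have h1 : pvPop p i ((List.range' (i + 1) m).filter (pvGood p (i + 1)))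
      = ((List.range' (i + 1) m).filter (pvGood p (i + 1))).dropWhile (fun x => !(c x)) := by
    rw [pvPop_eq_dropWhile, hfun]
  have hpw : ((List.range' (i + 1) m).filter (pvGood p (i + 1))).Pairwise
      (fun a b => c a = true → c b = true) := by
    refine (filtered_pairwise p (i + 1) (i + 1) m le_rfl).imp ?_
    intro a b hab hca
    simp only [hc, decide_eq_true_eq] at hca ⊢
    exact lt_trans hab hca
  rw [h1, dropWhile_not_eq_filter c _ hpw, List.filter_filter]
  apply List.filter_congr
  intro x hx
  have hx' := List.mem_range'_1.mp hx
  rw [pvGood_split p i x (by omega)]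

-- stack invariant: after processing indices n-m .. n-1 the stack is the list of survivors
lemma stack_inv (p : List Int) (n : Nat) : ∀ m, m ≤ n →
    (pvSufB p n m).1 = (List.range' (n - m) m).filter (pvGood p (n - m)) := by
  intro m
  induction m with
  | zero => simp [pvSufB]
  | succ m ih =>
    intro hm
    obtain ⟨i, rfl⟩ : ∃ i, n = i + (m + 1) := ⟨n - (m + 1), by omega⟩
    have e1 : i + (m + 1) - (m + 1) = i := by omega
    have e2 : i + (m + 1) - m = i + 1 := by omega
    have hprev : (pvSufB p (i + (m + 1)) m).1 = (List.range' (i + 1) m).filter (pvGood p (i + 1)) := by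
      rw [ih (by omega), e2]
    show (i + (m + 1) - (m + 1)) :: pvPop p (i + (m + 1) - (m + 1)) (pvSufB p (i + (m + 1)) m).1 = _
    rw [e1, hprev, pop_filter, List.range'_succ, List.filter_cons,
      if_pos (pvGood_self p i)]

-- characterisation of A's inner loop by the first falling index
lemma innerA_char (p : List Int) (q : Int) : ∀ m j acc,
    pvInnerA p q (List.range' j m) acc
      = acc + (match (List.range' j m).find? (fun k => decide (q > p.getD k 0)) with
               | some k => (k : Int) - (j : Int) + 1
               | none => (m : Int)) := by
  intro m
  induction m with
  | zero => intro j acc; simp [pvInnerA]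
  | succ m ih =>
    intro j acc
    rw [List.range'_succ]
    show (if q > p.getD j 0 then acc + 1 else pvInnerA p q (List.range' (j + 1) m) (acc + 1)) = _
    by_cases h : q > p.getD j 0
    · rw [if_pos h, List.find?_cons_of_pos (by simpa using h)]
      push_cast; ring
    · rw [if_neg h, ih (j + 1) (acc + 1), List.find?_cons_of_neg (by simpa using h)]
      cases hf : (List.range' (j + 1) m).find? (fun k => decide (q > p.getD k 0)) with
      | none =>
        show acc + 1 + ((m : Nat) : Int) = acc + ((m + 1 : Nat) : Int)
        push_cast; ring
      | some k =>
        show acc + 1 + ((k : Int) - ((j + 1 : Nat) : Int) + 1) = acc + ((k : Int) - (j : Int) + 1)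
        push_cast; ring

-- on a tail of the scan where no earlier index fell, survivorship = "price fell"
lemma find_good_eq (p : List Int) (i : Nat) : ∀ m j, i < j →
    (∀ k, i < k → k < j → ¬(p.getD i 0 > p.getD k 0)) →
    (List.range' j m).find? (fun k => pvGood p i k)
      = (List.range' j m).find? (fun k => decide (p.getD i 0 > p.getD k 0)) := by
  intro m
  induction m with
  | zero => intro j _ _; rfl
  | succ m ih =>
    intro j hij hinv
    rw [List.range'_succ]
    by_cases h : p.getD i 0 > p.getD j 0
    · have hg : pvGood p i j = true := by
        simp only [pvGood, List.all_eq_true]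
        intro k hk
        have hk' := List.mem_range'_1.mp hk
        rcases Nat.eq_or_lt_of_le hk'.1 with he | hlt
        · simpa [← he] using h
        · have := hinv k hlt (by omega)
          simp only [gt_iff_lt, not_lt] at this
          simpa using lt_of_lt_of_le h this
      rw [List.find?_cons_of_pos hg, List.find?_cons_of_pos (by simpa using h)]
    · have hg : pvGood p i j = false := by
        simp only [pvGood, List.all_eq_false]
        refine ⟨i, List.mem_range'_1.mpr (by omega), by simpa using h⟩
      rw [List.find?_cons_of_neg (by simp [hg]), List.find?_cons_of_neg (by simpa using h)]
      exact ih (j + 1) (by omega) (fun k hk1 hk2 => by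
        rcases Nat.lt_or_ge k j with hkj | hkj
        · exact hinv k hk1 hkj
        · have : k = j := by omega
          simpa [this] using h)

-- result invariant: B's result entries equal A's per-index values
lemma result_inv (p : List Int) (n : Nat) : ∀ m, m ≤ n →
    (pvSufB p n m).2 = (List.range' (n - m) m).map (fun i =>
      pvInnerA p (p.getD i 0) (List.range' (i + 1) (n - (i + 1))) 0) := by
  intro m
  induction m with
  | zero => simp [pvSufB]
  | succ m ih =>
    intro hm
    obtain ⟨i, rfl⟩ : ∃ i, n = i + (m + 1) := ⟨n - (m + 1), by omega⟩
    have e1 : i + (m + 1) - (m + 1) = i := by omega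
    have e2 : i + (m + 1) - m = i + 1 := by omega
    have hlen : i + (m + 1) - (i + 1) = m := by omega
    have hstack : pvPop p i (pvSufB p (i + (m + 1)) m).1 = (List.range' (i + 1) m).filter (pvGood p i) := by
      rw [stack_inv p (i + (m + 1)) m (by omega), e2, pop_filter]
    have hhead : ((List.range' (i + 1) m).filter (pvGood p i)).head?
        = (List.range' (i + 1) m).find? (fun k => decide (p.getD i 0 > p.getD k 0)) := by
      rw [List.head?_filter]
      exact find_good_eq p i m (i + 1) (by omega) (fun k hk1 hk2 => by omega)
    have hA : pvInnerA p (p.getD i 0) (List.range' (i + 1) (i + (m + 1) - (i + 1))) 0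
        = (match pvPop p i (pvSufB p (i + (m + 1)) m).1 with
           | [] => ((i + (m + 1) : Nat) : Int) - 1 - (i : Int)
           | t :: _ => (t : Int) - (i : Int)) := by
      rw [hlen, innerA_char, hstack]
      cases hs : (List.range' (i + 1) m).filter (pvGood p i) with
      | nil =>
        have : (List.range' (i + 1) m).find? (fun k => decide (p.getD i 0 > p.getD k 0)) = none := by
          rw [← hhead, hs]; rfl
        rw [this]
        show (0 : Int) + ((m : Nat) : Int) = ((i + (m + 1) : Nat) : Int) - 1 - (i : Int)
        push_cast; ring
      | cons t rest =>
        have : (List.range' (i + 1) m).find? (fun k => decide (p.getD i 0 > p.getD k 0)) = some t := by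
          rw [← hhead, hs]; rfl
        rw [this]
        show (0 : Int) + ((t : Int) - ((i + 1 : Nat) : Int) + 1) = (t : Int) - (i : Int)
        push_cast; ring
    show _ :: (pvSufB p (i + (m + 1)) m).2 = _
    rw [ih (by omega), e1, e2, List.range'_succ, List.map_cons]
    exact congrArg₂ (· :: ·) (by rw [← hA]) rfl

-- ===== VERDICT (by name: the statement is the Claim_ definition above) =====
theorem get_price_not_fall_periods_spec : Claim_equal_get_price_not_fall_periods := by
  intro prices _
  show get_price_not_fall_periods prices = get_price_not_fall_periods_alt prices
  unfold get_price_not_fall_periods get_price_not_fall_periods_alt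
  rw [result_inv prices prices.length prices.length le_rfl, List.range_eq_range']
  simp
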